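-- pv_equiv track=rewrite | github.com/prettygood236/coding-challenges | dotting.py | solution
-- ===== SOURCE A (Python) =====
-- def solution(k, d):
--     list = []
--     for i in range(d+1):
--         for j in range(d+1):
--             if (i**2)+(j**2) <= d**2:
--                 list.append((i,j))
--     answer = 0
--     return list,len(list)
-- ===== SOURCE B (Python) =====
-- def solution(k, d):
--     pts = []
--     d2 = d * d
--     for i in range(d + 1):
--         # find the largest j with i*i + j*j <= d2 by scanning down from d
--         j = d
--         while j >= 0 and i * i + j * j > d2:
--             j -= 1
--         for t in range(j + 1):
--             pts.append((i, t))
--     return pts, len(pts)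
-- ===== Notes on version B (the rewrite author's own statement) =====
-- stated objective: alternative
-- what changed: Instead of testing i^2+j^2<=d^2 at every lattice point, B finds the row's largest admissible j by a downward threshold scan and then appends the whole prefix range unconditionally.
import Mathlib
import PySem

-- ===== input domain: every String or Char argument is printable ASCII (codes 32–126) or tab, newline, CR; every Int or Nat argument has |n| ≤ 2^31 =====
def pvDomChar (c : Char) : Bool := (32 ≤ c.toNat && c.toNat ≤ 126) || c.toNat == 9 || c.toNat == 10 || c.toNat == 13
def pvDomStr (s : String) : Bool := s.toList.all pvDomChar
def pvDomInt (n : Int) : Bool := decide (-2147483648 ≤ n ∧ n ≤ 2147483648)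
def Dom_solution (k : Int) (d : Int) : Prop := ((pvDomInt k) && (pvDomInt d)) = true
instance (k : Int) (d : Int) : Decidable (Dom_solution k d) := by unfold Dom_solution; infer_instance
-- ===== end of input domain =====

-- B replaces the per-point membership test of A by a per-row downward threshold scan
-- that finds the largest admissible j and appends the whole prefix range (objective: alternative).


-- ===== PORT A =====
def solution (k : Int) (d : Int) : (List (Int × Int)) × Int :=
  let lst := (PySem.List.pyRange 0 (d+1) 1).foldl (fun acc i =>
      (PySem.List.pyRange 0 (d+1) 1).foldl (fun acc2 j =>
        if i^2 + j^2 ≤ d^2 then acc2 ++ [(i, j)] else acc2) acc) []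
  (lst, (lst.length : Int))

-- ===== PORT B =====
-- port of Source B's 'while j >= 0 and i*i + j*j > d2: j -= 1'
def findB (d2 : Int) (i : Int) (j : Int) : Int :=
  if h : 0 ≤ j ∧ d2 < i*i + j*j then findB d2 i (j-1) else j
termination_by (j+1).toNat
decreasing_by omega

def solution_alt (k : Int) (d : Int) : (List (Int × Int)) × Int :=
  let d2 := d*d
  let pts := (PySem.List.pyRange 0 (d+1) 1).foldl (fun acc i =>
      let jb := findB d2 i d
      (PySem.List.pyRange 0 (jb+1) 1).foldl (fun acc2 t => acc2 ++ [(i, t)]) acc) []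
  (pts, (pts.length : Int))

-- ===== PRECONDITION & SPEC =====
def Spec_solution (k : Int) (d : Int) (out : (List (Int × Int)) × Int) : Prop := out = solution_alt k d
instance (k : Int) (d : Int) (out : (List (Int × Int)) × Int) : Decidable (Spec_solution k d out) := by unfold Spec_solution; infer_instance

-- ===== CLAIM (what is proved, stated in full; the proofs are below) =====
def Claim_equal_solution : Prop := ∀ (k : Int) (d : Int), Dom_solution k d → Spec_solution k d (solution k d)

-- ===== LEMMAS AND PROOFS =====

-- findB, started at j with 0 ≤ j and with a satisfiable row (i*i ≤ d2), returns the
-- largest 0 ≤ r ≤ j with i*i + r*r ≤ d2.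
theorem findB_spec : ∀ (d2 i j : Int), 0 ≤ j → i*i ≤ d2 →
    0 ≤ findB d2 i j ∧ findB d2 i j ≤ j ∧ i*i + (findB d2 i j)*(findB d2 i j) ≤ d2 ∧
      ∀ t, findB d2 i j < t → t ≤ j → d2 < i*i + t*t := by
  intro d2 i
  suffices h : ∀ (n : Nat) (j : Int), (j+1).toNat ≤ n → 0 ≤ j → i*i ≤ d2 →
      0 ≤ findB d2 i j ∧ findB d2 i j ≤ j ∧ i*i + (findB d2 i j)*(findB d2 i j) ≤ d2 ∧
        ∀ t, findB d2 i j < t → t ≤ j → d2 < i*i + t*t by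
    exact fun j hj hle => h ((j+1).toNat) j le_rfl hj hle
  intro n
  induction n with
  | zero => intro j hn hj _; omega
  | succ n ih =>
      intro j hn hj hle
      rw [findB]
      split
      · next h =>
          by_cases hz : 0 < j
          · obtain ⟨h1, h2, h3, h4⟩ := ih (j-1) (by omega) (by omega) hle
            refine ⟨h1, by omega, h3, ?_⟩
            intro t ht1 ht2
            by_cases hc : t ≤ j - 1
            · exact h4 t ht1 hc
            · have : t = j := by omega
              subst this; exact h.2
          · have hj0 : j = 0 := by omega
            subst hj0
            simp at h
            omega
      · next h =>
          refine ⟨by omega, le_refl _, by omega, by omega⟩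

-- for a row 0 ≤ i ≤ d, the filter of A's inner loop is exactly B's prefix range
theorem row_eq (d i : Int) (h0 : 0 ≤ i) (hid : i ≤ d) :
    (PySem.List.pyRange 0 (d+1) 1).filter (fun j => decide (i^2 + j^2 ≤ d^2)) =
      PySem.List.pyRange 0 (findB (d*d) i d + 1) 1 := by
  have hd : (0:Int) ≤ d := le_trans h0 hid
  have hii : i*i ≤ d*d := mul_self_le_mul_self h0 hid
  obtain ⟨h1, h2, h3, h4⟩ := findB_spec (d*d) i d hd hii
  set r := findB (d*d) i d with hr
  have hsplit : PySem.List.pyRange 0 (d+1) 1 =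
      PySem.List.pyRange 0 (r+1) 1 ++ PySem.List.pyRange (r+1) (d+1) 1 :=
    PySem.List.pyRange_one_append 0 (r+1) (d+1) (by omega) (by omega)
  rw [hsplit, List.filter_append]
  have hfst : (PySem.List.pyRange 0 (r+1) 1).filter (fun j => decide (i^2 + j^2 ≤ d^2)) =
      PySem.List.pyRange 0 (r+1) 1 := by
    apply List.filter_eq_self.mpr
    intro j hj
    rw [PySem.List.mem_pyRange_one] at hj
    have hjr : j ≤ r := by omega
    have : j*j ≤ r*r := mul_self_le_mul_self hj.1 hjr
    simp only [decide_eq_true_eq]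
    nlinarith
  have hsnd : (PySem.List.pyRange (r+1) (d+1) 1).filter (fun j => decide (i^2 + j^2 ≤ d^2)) = [] := by
    apply List.filter_eq_nil_iff.mpr
    intro j hj
    rw [PySem.List.mem_pyRange_one] at hj
    have := h4 j (by omega) (by omega)
    simp only [decide_eq_true_eq]
    intro hc
    nlinarith [hc]
  rw [hfst, hsnd, List.append_nil]

theorem solution_eq_alt (k d : Int) : solution k d = solution_alt k d := by
  unfold solution solution_alt
  have hlist : (PySem.List.pyRange 0 (d+1) 1).foldl (fun acc i =>
      (PySem.List.pyRange 0 (d+1) 1).foldl (fun acc2 j =>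
        if i^2 + j^2 ≤ d^2 then acc2 ++ [(i, j)] else acc2) acc) ([] : List (Int × Int)) =
      (PySem.List.pyRange 0 (d+1) 1).foldl (fun acc i =>
      (PySem.List.pyRange 0 (findB (d*d) i d + 1) 1).foldl
        (fun acc2 t => acc2 ++ [(i, t)]) acc) ([] : List (Int × Int)) := by
    apply PySem.List.foldl_congr_mem
    intro acc i hi
    rw [PySem.List.mem_pyRange_one] at hi
    rw [PySem.List.foldl_append_ite (fun j => i^2 + j^2 ≤ d^2) (fun j => (i, j)),
        PySem.List.foldl_append_singleton_eq_map,
        row_eq d i hi.1 (by omega)]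
  simp only [hlist]

-- ===== VERDICT (by name: the statement is the Claim_ definition above) =====
theorem solution_spec : Claim_equal_solution := by
  intro k d _
  exact solution_eq_alt k d
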